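-- pv_equiv track=rewrite | github.com/anunkai1/matrix | src/telegram_bridge/dishframed_processing.py | parse_dishframed_cli_output
-- ===== SOURCE A (Python) =====
-- from typing import List, Optional
--
-- def parse_dishframed_cli_output(stdout: str) -> tuple[Optional[str], str]:
--     output_path: Optional[str] = None
--     preview_text = ""
--     for raw_line in (stdout or "").splitlines():
--         line = raw_line.strip()
--         if line.startswith("Output:"):
--             candidate = line.split(":", 1)[1].strip()
--             if candidate:
--                 output_path = candidate
--             continue
--         if line:
--             preview_text = line
--     return output_path, preview_text
-- ===== SOURCE B (Python) =====
-- def parse_dishframed_cli_output(stdout):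
--     lines = [l.strip() for l in (stdout or "").splitlines()]
--     output_path = next((c for l in reversed(lines) if l.startswith("Output:")
--                         for c in [l.split(":", 1)[1].strip()] if c), None)
--     preview_text = next((l for l in reversed(lines) if l and not l.startswith("Output:")), "")
--     return output_path, preview_text
-- ===== Notes on version B (the rewrite author's own statement) =====
-- stated objective: alternative
-- what changed: Replaces A's single forward fold that overwrites both accumulators with two independent reverse early-stopping searches (findSome?/find? over the reversed stripped lines) for the path and the preview line.
import Mathlib
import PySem

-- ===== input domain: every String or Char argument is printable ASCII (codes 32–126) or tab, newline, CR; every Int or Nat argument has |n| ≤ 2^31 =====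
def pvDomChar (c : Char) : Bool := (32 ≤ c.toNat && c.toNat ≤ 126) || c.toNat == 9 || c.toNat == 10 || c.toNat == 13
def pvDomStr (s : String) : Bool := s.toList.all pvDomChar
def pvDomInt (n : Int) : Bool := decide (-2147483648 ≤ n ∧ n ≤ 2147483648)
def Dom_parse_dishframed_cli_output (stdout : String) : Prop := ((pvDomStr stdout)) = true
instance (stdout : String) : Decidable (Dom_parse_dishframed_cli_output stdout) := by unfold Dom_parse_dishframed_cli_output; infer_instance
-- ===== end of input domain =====

-- B computes the two fields by two independent reverse early-stopping searches over the
-- stripped lines, instead of A's single forward fold that keeps overwriting both fields.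


-- ===== PORT A =====
-- one forward pass: fold over the raw lines, last match wins for each field
def pvStepA (st : Option String × String) (raw_line : String) : Option String × String :=
  let line := PySem.Str.strip raw_line
  if PySem.Str.startswith line "Output:" then
    -- line starts with "Output:", so split(":",1) always has a second piece; getD defaults are unreachable
    let candidate := PySem.Str.strip (((PySem.Str.splitMax? line ":" 1).getD []).getD 1 "")
    if candidate ≠ "" then (some candidate, st.2) else st
  else if line ≠ "" then (st.1, line) else st

def parse_dishframed_cli_output (stdout : String) : Option String × String :=
  (PySem.Str.splitlines stdout).foldl pvStepA (none, "")

-- ===== PORT B =====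
-- candidate extracted from an "Output:" line, none otherwise (one step of the first reverse search)
def pvOutCand (l : String) : Option String :=
  if PySem.Str.startswith l "Output:" then
    let c := PySem.Str.strip (((PySem.Str.splitMax? l ":" 1).getD []).getD 1 "")
    if c ≠ "" then some c else none
  else none

-- predicate of the second reverse search: a non-empty line that is not an "Output:" line
def pvPreviewP (l : String) : Bool := l != "" && !PySem.Str.startswith l "Output:"

def parse_dishframed_cli_output_alt (stdout : String) : Option String × String :=
  let lines := (PySem.Str.splitlines stdout).map PySem.Str.strip
  (lines.reverse.findSome? pvOutCand, (lines.reverse.find? pvPreviewP).getD "")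

-- ===== PRECONDITION & SPEC =====
def Spec_parse_dishframed_cli_output (stdout : String) (out : Option String × String) : Prop := out = parse_dishframed_cli_output_alt stdout
instance (stdout : String) (out : Option String × String) : Decidable (Spec_parse_dishframed_cli_output stdout out) := by unfold Spec_parse_dishframed_cli_output; infer_instance

-- ===== CLAIM (what is proved, stated in full; the proofs are below) =====
def Claim_equal_parse_dishframed_cli_output : Prop := ∀ (stdout : String), Dom_parse_dishframed_cli_output stdout → Spec_parse_dishframed_cli_output stdout (parse_dishframed_cli_output stdout)

-- ===== LEMMAS AND PROOFS =====

lemma pvStepA_eq (st : Option String × String) (raw : String) :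
    pvStepA st raw =
      ((pvOutCand (PySem.Str.strip raw)).or st.1,
       if pvPreviewP (PySem.Str.strip raw) then PySem.Str.strip raw else st.2) := by
  simp only [pvStepA, pvOutCand, pvPreviewP]
  by_cases h : PySem.Str.startswith (PySem.Str.strip raw) "Output:" = true
  · simp only [h, if_true]
    split <;> simp_all
  · simp only [h, Bool.false_eq_true, if_false]
    split <;> simp_all

lemma pvFold_eq (ls : List String) (st : Option String × String) :
    ls.foldl pvStepA st =
      (((ls.map PySem.Str.strip).reverse.findSome? pvOutCand).or st.1,
       (((ls.map PySem.Str.strip).reverse.find? pvPreviewP).getD st.2)) := by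
  induction ls generalizing st with
  | nil => simp
  | cons l ls ih =>
    simp only [List.foldl_cons, ih, List.map_cons, List.reverse_cons,
      List.findSome?_append, List.find?_append, pvStepA_eq]
    refine Prod.ext ?_ ?_
    · cases hf : List.findSome? pvOutCand (ls.map PySem.Str.strip).reverse <;>
        cases hc : pvOutCand (PySem.Str.strip l) <;> simp [List.findSome?, hc]
    · cases hf : List.find? pvPreviewP (ls.map PySem.Str.strip).reverse <;>
        cases hp : pvPreviewP (PySem.Str.strip l) <;> simp [List.find?, hp]

-- ===== VERDICT (by name: the statement is the Claim_ definition above) =====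
theorem parse_dishframed_cli_output_spec : Claim_equal_parse_dishframed_cli_output := by
  intro stdout _
  unfold Spec_parse_dishframed_cli_output parse_dishframed_cli_output parse_dishframed_cli_output_alt
  rw [pvFold_eq]
  simp
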